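-- pv_equiv track=rewrite | github.com/vrublevskiyvitaliy/NER | en_data_provider.py | process_data_mode_name_l
-- ===== SOURCE A (Python) =====
-- def process_data_mode_name_l(data):
--     correct_data = []
--     for s in data:
--         correct_s = []
--         next_tag = None
--         flag = True
--         for i in reversed(range(len(s))):
--             word = s[i]
--             tag = word[2]
--             if len(tag) > 1:
--                 if flag:
--                     t = 'L-NAME'
--                     flag = False
--                 else:
--                     if next_tag and next_tag[2:] != tag[2:]:
--                         t = 'L-NAME'
--                     else:
--                         t = 'NAME'
--             else:
--                 flag = True
--                 t = tag
--             next_tag = tag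
--             correct_s.append((word[0], word[1], t))
--         reversed_list = []
--         for i in reversed(range(len(s))):
--             reversed_list.append(correct_s[i])
--         correct_data.append(reversed_list)
--     return correct_data
-- ===== SOURCE B (Python) =====
-- def _runs(s):
--     # partition s into maximal consecutive groups: name tokens (len(tag) > 1)
--     # sharing one suffix tag[2:] group together; every other token is a
--     # singleton group with key None
--     groups = []
--     for w in s:
--         key = w[2][2:] if len(w[2]) > 1 else None
--         if key is not None and groups and groups[-1][0] == key:
--             groups[-1][1].append(w)
--         else:
--             groups.append((key, [w]))
--     return groups
--
--
-- def process_data_mode_name_l(data):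
--     result = []
--     for s in data:
--         out = []
--         for key, grp in _runs(s):
--             if key is None:
--                 w = grp[0]
--                 out.append((w[0], w[1], w[2]))
--             else:
--                 for w in grp[:-1]:
--                     out.append((w[0], w[1], 'NAME'))
--                 w = grp[-1]
--                 out.append((w[0], w[1], 'L-NAME'))
--         result.append(out)
--     return result
-- ===== Notes on version B (the rewrite author's own statement) =====
-- stated objective: alternative
-- what changed: B first partitions each sentence into maximal runs of name tokens sharing one tag[2:] suffix (a group-by pass), then relabels each run as NAME* + L-NAME and passes singleton non-name groups through, replacing A's reversed stateful scan (flag + carried next_tag) followed by a re-reversing index loop.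
import Mathlib
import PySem

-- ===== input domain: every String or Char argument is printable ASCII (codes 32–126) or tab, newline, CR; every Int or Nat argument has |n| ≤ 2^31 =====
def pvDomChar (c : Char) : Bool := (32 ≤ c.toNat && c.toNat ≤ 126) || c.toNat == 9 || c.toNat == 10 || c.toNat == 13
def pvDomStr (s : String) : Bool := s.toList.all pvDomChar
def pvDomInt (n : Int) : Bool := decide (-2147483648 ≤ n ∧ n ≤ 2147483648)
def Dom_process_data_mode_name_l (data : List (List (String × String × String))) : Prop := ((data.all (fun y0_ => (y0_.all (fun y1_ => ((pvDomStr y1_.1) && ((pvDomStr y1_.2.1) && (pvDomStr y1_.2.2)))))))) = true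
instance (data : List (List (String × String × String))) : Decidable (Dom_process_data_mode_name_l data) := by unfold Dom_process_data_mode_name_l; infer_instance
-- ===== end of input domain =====

-- B replaces A's reversed stateful scan (flag + carried next_tag) and the re-reversing index loop
-- by a group-by pass building maximal same-suffix name runs, then relabelling each run (objective: alternative).


-- ===== PORT A =====
-- step of A's inner reversed loop; state = (correct_s, next_tag, flag)
def pvAStep (st : List (String × String × String) × Option String × Bool)
    (word : String × String × String) :
    List (String × String × String) × Option String × Bool :=
  let correct_s := st.1
  let next_tag := st.2.1
  let flag := st.2.2
  let tag := word.2.2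
  if 1 < PySem.Str.len tag then
    if flag then
      (correct_s ++ [(word.1, word.2.1, "L-NAME")], some tag, false)
    else
      let t :=
        if (match next_tag with
            | none => false
            | some nt => !(nt == "") && !(PySem.Str.slice nt (some 2) none == PySem.Str.slice tag (some 2) none)) then
          "L-NAME"
        else "NAME"
      (correct_s ++ [(word.1, word.2.1, t)], some tag, flag)
  else
    (correct_s ++ [(word.1, word.2.1, tag)], some tag, true)

-- 'for i in reversed(range(len(s)))' is the reversed index list (pyRange 0 n 1).reverse
def process_data_mode_name_l (data : List (List (String × String × String))) : List (List (String × String × String)) :=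
  data.foldl (fun correct_data s =>
    let n : Int := (s.length : Int)
    let st := ((PySem.List.pyRange 0 n 1).reverse).foldl
      (fun st i => pvAStep st (PySem.List.pyGetD s i ("", "", ""))) ([], none, true)
    let correct_s := st.1
    let reversed_list := ((PySem.List.pyRange 0 n 1).reverse).foldl
      (fun acc i => acc ++ [PySem.List.pyGetD correct_s i ("", "", "")]) []
    correct_data ++ [reversed_list]) []

-- ===== PORT B =====
-- key = w[2][2:] if len(w[2]) > 1 else None
def pvKey (w : String × String × String) : Option String :=
  if 1 < PySem.Str.len w.2.2 then some (PySem.Str.slice w.2.2 (some 2) none) else none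

-- one step of B's grouping loop ('_runs'): append to the last group or open a new one
def pvRunsStep (groups : List (Option String × List (String × String × String)))
    (w : String × String × String) : List (Option String × List (String × String × String)) :=
  let key := pvKey w
  if key ≠ none ∧ groups ≠ [] ∧ (PySem.List.pyGetD groups (-1) (none, [])).1 = key then
    groups.dropLast ++ [(key, (PySem.List.pyGetD groups (-1) (none, [])).2 ++ [w])]
  else
    groups ++ [(key, [w])]

-- one iteration of B's emission loop over the groups
def pvEmitStep (out : List (String × String × String))
    (g : Option String × List (String × String × String)) : List (String × String × String) :=
  match g.1 with
  | none =>
    let w := PySem.List.pyGetD g.2 0 ("", "", "")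
    out ++ [(w.1, w.2.1, w.2.2)]
  | some _ =>
    let out := (PySem.List.slice g.2 none (some (-1))).foldl
      (fun out w => out ++ [(w.1, w.2.1, "NAME")]) out
    let wl := PySem.List.pyGetD g.2 (-1) ("", "", "")
    out ++ [(wl.1, wl.2.1, "L-NAME")]

def process_data_mode_name_l_alt (data : List (List (String × String × String))) : List (List (String × String × String)) :=
  data.foldl (fun result s =>
    let groups := s.foldl pvRunsStep []
    let out := groups.foldl pvEmitStep []
    result ++ [out]) []

-- ===== PRECONDITION & SPEC =====
def Spec_process_data_mode_name_l (data : List (List (String × String × String))) (out : List (List (String × String × String))) : Prop := out = process_data_mode_name_l_alt data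
instance (data : List (List (String × String × String))) (out : List (List (String × String × String))) : Decidable (Spec_process_data_mode_name_l data out) := by unfold Spec_process_data_mode_name_l; infer_instance

-- ===== CLAIM (what is proved, stated in full; the proofs are below) =====
def Claim_equal_process_data_mode_name_l : Prop := ∀ (data : List (List (String × String × String))), Dom_process_data_mode_name_l data → Spec_process_data_mode_name_l data (process_data_mode_name_l data)

-- ===== LEMMAS AND PROOFS =====

-- the common reference: forward lookahead labelling (proof device only; used by neither port)
def pvNewTag (t nt : String) : String :=
  if PySem.Str.len t ≤ 1 then t
  else if PySem.Str.len nt ≤ 1 then "L-NAME"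
  else if PySem.Str.slice nt (some 2) none = PySem.Str.slice t (some 2) none then "NAME"
  else "L-NAME"

def pvTagOf (w : String × String × String) : String := w.2.2

def pvOutTok (w : String × String × String) (nt : String) : String × String × String :=
  (w.1, w.2.1, pvNewTag w.2.2 nt)

def pvFwd : List (String × String × String) → String → List (String × String × String)
  | [], _ => []
  | [w], nt => [pvOutTok w nt]
  | w :: w' :: rest, nt => pvOutTok w (pvTagOf w') :: pvFwd (w' :: rest) nt

-- ---------- A-side: A's row equals pvFwd s "" ----------

theorem pv_foldl_revrange {α β : Type} (f : β → α → β) (d : α) :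
    ∀ (xs : List α) (init : β),
      ((PySem.List.pyRange 0 (xs.length : Int) 1).reverse).foldl
          (fun acc i => f acc (PySem.List.pyGetD xs i d)) init
        = xs.reverse.foldl f init := by
  intro xs init
  induction xs using List.reverseRecOn generalizing init with
  | nil => simp [PySem.List.pyRange_one_eq_nil]
  | append_singleton ys y ih =>
    have hlen : ((ys ++ [y]).length : Int) = (ys.length : Int) + 1 := by
      simp
    rw [hlen, PySem.List.pyRange_one_succ_right (by positivity)]
    simp only [List.reverse_append, List.reverse_cons, List.reverse_nil, List.nil_append,
      List.cons_append, List.foldl_cons]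
    have hy : PySem.List.pyGetD (ys ++ [y]) ((ys.length : Int)) d = y := by
      rw [PySem.List.pyGetD_natCast]
      simp
    rw [hy]
    have hcong :
        ((PySem.List.pyRange 0 (ys.length : Int) 1).reverse).foldl
            (fun acc i => f acc (PySem.List.pyGetD (ys ++ [y]) i d)) (f init y)
          = ((PySem.List.pyRange 0 (ys.length : Int) 1).reverse).foldl
            (fun acc i => f acc (PySem.List.pyGetD ys i d)) (f init y) := by
      apply PySem.List.foldl_congr_mem
      intro acc i hi
      have hi' : i ∈ PySem.List.pyRange 0 (ys.length : Int) 1 := by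
        simpa using hi
      have hrange := (PySem.List.mem_pyRange_one).1 hi'
      obtain ⟨h0, hlt⟩ := hrange
      congr 1
      obtain ⟨k, rfl⟩ := Int.eq_ofNat_of_zero_le h0
      have hk : k < ys.length := by exact_mod_cast hlt
      simp [List.getD_eq_getElem?_getD, List.getElem?_append_left hk]
    rw [hcong, ih]

-- A's reversed loop, written structurally over the reversed sentence;
-- nt = tag of the token to the right ("" when there is none)
def pvRevP : List (String × String × String) → String → List (String × String × String)
  | [], _ => []
  | w :: rest, nt => pvOutTok w nt :: pvRevP rest (pvTagOf w)

def pvNtStr : Option String → String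
  | none => ""
  | some t => t

theorem pv_astep_eq (acc : List (String × String × String)) (nt : Option String)
    (w : String × String × String) :
    pvAStep (acc, nt, decide (PySem.Str.len (pvNtStr nt) ≤ 1)) w
      = (acc ++ [pvOutTok w (pvNtStr nt)], some (pvTagOf w),
          decide (PySem.Str.len (pvTagOf w) ≤ 1)) := by
  by_cases h1 : (1 : Int) < (w.2.2.length : Int)
  · by_cases hle : (((pvNtStr nt).length : Nat) : Int) ≤ 1
    · simp [pvAStep, pvOutTok, pvNewTag, pvTagOf, hle, h1, not_le.2 h1]
    · cases nt with
      | none => exact absurd (by decide) hle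
      | some nt0 =>
        have hgt : ¬ ((nt0.length : Nat) : Int) ≤ 1 := by simpa [pvNtStr] using hle
        have hne : (nt0 == "") = false := by
          by_cases he : nt0 = ""
          · subst he; exact absurd (by decide) hgt
          · simp [he]
        by_cases hs : PySem.Str.slice nt0 (some 2) none = PySem.Str.slice w.2.2 (some 2) none
        · simp [pvAStep, pvOutTok, pvNewTag, pvTagOf, pvNtStr, hgt, h1, not_le.2 h1, hne, hs]
        · simp [pvAStep, pvOutTok, pvNewTag, pvTagOf, pvNtStr, hgt, h1, not_le.2 h1, hne, hs]
  · have hle1 : ((w.2.2.length : Nat) : Int) ≤ 1 := not_lt.1 h1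
    simp [pvAStep, pvOutTok, pvNewTag, pvTagOf, h1, hle1, Prod.mk.eta]

theorem pv_fold1 (l : List (String × String × String)) :
    ∀ (acc : List (String × String × String)) (nt : Option String) (flag : Bool),
      flag = decide (PySem.Str.len (pvNtStr nt) ≤ 1) →
      (l.foldl pvAStep (acc, nt, flag)).1 = acc ++ pvRevP l (pvNtStr nt) := by
  induction l with
  | nil => intro acc nt flag _; simp [pvRevP]
  | cons w rest ih =>
    intro acc nt flag hinv
    simp only [List.foldl_cons]
    rw [hinv, pv_astep_eq acc nt w]
    rw [ih (acc ++ [pvOutTok w (pvNtStr nt)]) (some (pvTagOf w))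
          (decide (PySem.Str.len (pvTagOf w) ≤ 1)) rfl]
    simp [pvRevP, pvNtStr]

theorem pv_revp_length (l : List (String × String × String)) :
    ∀ nt, (pvRevP l nt).length = l.length := by
  induction l with
  | nil => intro nt; simp [pvRevP]
  | cons w rest ih => intro nt; simp [pvRevP, ih]

theorem pv_fwd_snoc (s : List (String × String × String)) :
    ∀ (w : String × String × String) (nt : String),
      pvFwd (s ++ [w]) nt = pvFwd s (pvTagOf w) ++ [pvOutTok w nt] := by
  induction s with
  | nil => intro w nt; simp [pvFwd]
  | cons x s' ih =>
    intro w nt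
    cases s' with
    | nil => simp [pvFwd]
    | cons y s'' =>
      have ihw := ih w nt
      simp only [List.cons_append, pvFwd] at ihw ⊢
      rw [ihw]

theorem pv_revp_reverse (l : List (String × String × String)) :
    ∀ nt, (pvRevP l nt).reverse = pvFwd l.reverse nt := by
  induction l with
  | nil => intro nt; simp [pvRevP, pvFwd]
  | cons w rest ih =>
    intro nt
    simp only [pvRevP, List.reverse_cons]
    rw [ih (pvTagOf w), pv_fwd_snoc]

-- A's per-sentence body equals the forward-lookahead reference
theorem pv_rowA_eq (s : List (String × String × String)) :
    (let n : Int := (s.length : Int)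
     let st := ((PySem.List.pyRange 0 n 1).reverse).foldl
       (fun st i => pvAStep st (PySem.List.pyGetD s i ("", "", ""))) ([], none, true)
     let correct_s := st.1
     ((PySem.List.pyRange 0 n 1).reverse).foldl
       (fun acc i => acc ++ [PySem.List.pyGetD correct_s i ("", "", "")]) [])
    = pvFwd s "" := by
  simp only
  rw [pv_foldl_revrange pvAStep ("", "", "") s ([], none, true)]
  have h1 : (s.reverse.foldl pvAStep ([], none, true)).1 = pvRevP s.reverse "" := by
    have := pv_fold1 s.reverse [] none true (by decide)
    simpa [pvNtStr] using this
  set cs := (s.reverse.foldl pvAStep ([], none, true)).1 with hcs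
  have hlen : cs.length = s.length := by
    rw [h1, pv_revp_length]; simp
  have h2 : ((PySem.List.pyRange 0 (s.length : Int) 1).reverse).foldl
      (fun acc i => acc ++ [PySem.List.pyGetD cs i ("", "", "")]) []
      = cs.reverse := by
    rw [← hlen]
    rw [pv_foldl_revrange (fun acc x => acc ++ [x]) ("", "", "") cs []]
    simpa using PySem.List.foldl_append_singleton_eq_map (fun x => x) cs.reverse []
  rw [h2, h1, pv_revp_reverse, List.reverse_reverse]

-- ---------- B-side: B's row equals pvFwd s "" ----------

def pvToNAME (w : String × String × String) : String × String × String := (w.1, w.2.1, "NAME")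
def pvToL (w : String × String × String) : String × String × String := (w.1, w.2.1, "L-NAME")

def pvEmitG (g : Option String × List (String × String × String)) : List (String × String × String) :=
  pvEmitStep [] g

theorem pv_emitstep_append (out : List (String × String × String))
    (g : Option String × List (String × String × String)) :
    pvEmitStep out g = out ++ pvEmitG g := by
  cases g with
  | mk k r =>
    cases k with
    | none => simp [pvEmitStep, pvEmitG]
    | some σ =>
      simp only [pvEmitStep, pvEmitG]
      rw [PySem.List.foldl_append_singleton_eq_map, PySem.List.foldl_append_singleton_eq_map]
      simp

theorem pv_foldl_emit (gs : List (Option String × List (String × String × String)))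
    (out : List (String × String × String)) :
    gs.foldl pvEmitStep out = out ++ gs.flatMap pvEmitG := by
  induction gs generalizing out with
  | nil => simp
  | cons g gs' ih =>
    simp only [List.foldl_cons, List.flatMap_cons]
    rw [pv_emitstep_append, ih, List.append_assoc]

-- emission of a nonempty name group
theorem pv_emitG_some (σ : String) (r : List (String × String × String)) (hr : r ≠ []) :
    pvEmitG (some σ, r) = r.dropLast.map pvToNAME ++ [pvToL (r.getLastD ("", "", ""))] := by
  simp only [pvEmitG, pvEmitStep]
  rw [PySem.List.foldl_append_singleton_eq_map]
  rw [PySem.List.slice_to_neg_one, PySem.List.pyGetD_neg_one r _ hr]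
  have h2 : r.getLastD ("", "", "") = r.getLast hr := by
    rw [List.getLastD_eq_getLast?, List.getLast?_eq_some_getLast hr]
    rfl
  rw [h2]
  rfl

-- emission of a singleton non-name group
theorem pv_emitG_none (w : String × String × String) :
    pvEmitG (none, [w]) = [(w.1, w.2.1, w.2.2)] := by
  simp [pvEmitG, pvEmitStep, PySem.List.pyGetD_zero_cons]

-- coherence of a run: every token is a name token with suffix σ
def pvCoh (σ : String) (r : List (String × String × String)) : Prop :=
  ∀ w ∈ r, 1 < PySem.Str.len w.2.2 ∧ PySem.Str.slice w.2.2 (some 2) none = σ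

theorem pv_key_some {w : String × String × String} {σ : String} (h : pvKey w = some σ) :
    1 < PySem.Str.len w.2.2 ∧ PySem.Str.slice w.2.2 (some 2) none = σ := by
  unfold pvKey at h
  split at h
  · next h1 => exact ⟨h1, Option.some.inj h⟩
  · exact absurd h (by simp)

theorem pv_key_none {w : String × String × String} (h : pvKey w = none) :
    PySem.Str.len w.2.2 ≤ 1 := by
  unfold pvKey at h
  split at h
  · exact absurd h (by simp)
  · next h1 => exact not_lt.1 h1

-- evaluation lemmas for pvNewTag under Str.len hypotheses
theorem pv_newtag_nonname {t : String} (nt : String) (h : PySem.Str.len t ≤ 1) :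
    pvNewTag t nt = t := by
  unfold pvNewTag; rw [if_pos h]

theorem pv_newtag_short {t nt : String} (h1 : 1 < PySem.Str.len t)
    (h2 : PySem.Str.len nt ≤ 1) : pvNewTag t nt = "L-NAME" := by
  unfold pvNewTag; rw [if_neg (not_le.2 h1), if_pos h2]

theorem pv_newtag_same {t nt : String} (h1 : 1 < PySem.Str.len t)
    (h2 : 1 < PySem.Str.len nt)
    (h3 : PySem.Str.slice nt (some 2) none = PySem.Str.slice t (some 2) none) :
    pvNewTag t nt = "NAME" := by
  unfold pvNewTag; rw [if_neg (not_le.2 h1), if_neg (not_le.2 h2), if_pos h3]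

-- the head of s closes a run with suffix σ
def pvHeadClose (σ : String) (s : List (String × String × String)) : Prop :=
  match s with
  | [] => True
  | w :: _ => pvKey w ≠ some σ

theorem pv_newtag_close {t : String} {σ : String} (ht1 : 1 < PySem.Str.len t)
    (ht2 : PySem.Str.slice t (some 2) none = σ)
    (s : List (String × String × String)) (hc : pvHeadClose σ s)
    (w' : String × String × String) (hw' : s = w' :: (s.tail)) :
    pvNewTag t w'.2.2 = "L-NAME" := by
  have hk : pvKey w' ≠ some σ := by
    rw [hw'] at hc; exact hc
  unfold pvNewTag
  rw [if_neg (not_le.2 ht1)]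
  by_cases h1 : 1 < PySem.Str.len w'.2.2
  · have hs : PySem.Str.slice w'.2.2 (some 2) none ≠ PySem.Str.slice t (some 2) none := by
      intro he
      exact hk (by unfold pvKey; rw [if_pos h1, he, ht2])
    rw [if_neg (not_le.2 h1), if_neg hs]
  · rw [if_pos (not_lt.1 h1)]

-- a coherent run followed by a closing continuation: pvFwd splits
theorem pv_fwd_append_closed (r : List (String × String × String)) :
    ∀ (σ : String) (s : List (String × String × String)), pvCoh σ r → r ≠ [] →
      pvHeadClose σ s →
      pvFwd (r ++ s) "" = r.dropLast.map pvToNAME ++ [pvToL (r.getLastD ("", "", ""))] ++ pvFwd s "" := by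
  induction r with
  | nil => intro σ s _ hr _; exact absurd rfl hr
  | cons w r' ih =>
    intro σ s hcoh _ hclose
    obtain ⟨hw1, hw2⟩ := hcoh w (by simp)
    cases r' with
    | nil =>
      cases s with
      | nil =>
        simp only [List.append_nil, pvFwd, pvOutTok]
        rw [pv_newtag_short hw1 (by decide)]
        rfl
      | cons w' s' =>
        have hlab : pvNewTag w.2.2 w'.2.2 = "L-NAME" :=
          pv_newtag_close hw1 hw2 (w' :: s') hclose w' rfl
        simp only [List.cons_append, List.nil_append, pvFwd, pvOutTok, pvTagOf, hlab]
        rfl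
    | cons w2 r'' =>
      obtain ⟨hv1, hv2⟩ := hcoh w2 (by simp)
      have hname : pvNewTag w.2.2 w2.2.2 = "NAME" :=
        pv_newtag_same hw1 hv1 (hv2.trans hw2.symm)
      have ihr := ih σ s (fun x hx => hcoh x (by simp [hx])) (by simp) hclose
      simp only [List.cons_append, pvFwd, pvTagOf, pvOutTok] at ihr ⊢
      rw [ihr, hname]
      simp [pvToNAME]

-- a non-name token passes through at the head of pvFwd
theorem pv_fwd_pass (w : String × String × String) (rest : List (String × String × String))
    (h : PySem.Str.len w.2.2 ≤ 1) :
    pvFwd (w :: rest) "" = (w.1, w.2.1, w.2.2) :: pvFwd rest "" := by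
  cases rest with
  | nil => simp only [pvFwd, pvOutTok, pv_newtag_nonname _ h]
  | cons w' rest' => simp only [pvFwd, pvOutTok, pvTagOf, pv_newtag_nonname _ h]

-- a closed coherent run equals pvFwd of the run alone
theorem pv_fwd_run (σ : String) (r : List (String × String × String))
    (hcoh : pvCoh σ r) (hr : r ≠ []) :
    pvFwd r "" = r.dropLast.map pvToNAME ++ [pvToL (r.getLastD ("", "", ""))] := by
  have := pv_fwd_append_closed r σ [] hcoh hr (by trivial)
  simpa [pvFwd] using this

-- grouping step lemmas
theorem pv_runsstep_open (gs : List (Option String × List (String × String × String)))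
    (σ : String) (r : List (String × String × String))
    (w : String × String × String) :
    pvRunsStep (gs ++ [(some σ, r)]) w =
      if pvKey w = some σ then gs ++ [(some σ, r ++ [w])]
      else (gs ++ [(some σ, r)]) ++ [(pvKey w, [w])] := by
  by_cases hk : pvKey w = some σ
  · have hc : pvKey w ≠ none ∧ gs ++ [(some σ, r)] ≠ [] ∧
        (PySem.List.pyGetD (gs ++ [(some σ, r)]) (-1) (none, [])).1 = pvKey w := by
      refine ⟨by simp [hk], by simp, ?_⟩
      rw [PySem.List.pyGetD_neg_one_append_singleton, hk]
    simp only [pvRunsStep]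
    rw [if_pos hc, if_pos hk, PySem.List.pyGetD_neg_one_append_singleton, hk]
    simp
  · have hc : ¬ (pvKey w ≠ none ∧ gs ++ [(some σ, r)] ≠ [] ∧
        (PySem.List.pyGetD (gs ++ [(some σ, r)]) (-1) (none, [])).1 = pvKey w) := by
      rw [PySem.List.pyGetD_neg_one_append_singleton]
      rintro ⟨_, _, h3⟩
      exact hk h3.symm
    simp only [pvRunsStep]
    rw [if_neg hc, if_neg hk]

def pvClosedGs (gs : List (Option String × List (String × String × String))) : Prop :=
  match gs.getLast? with
  | none => True
  | some g => g.1 = none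

theorem pv_runsstep_closed (gs : List (Option String × List (String × String × String)))
    (hgs : pvClosedGs gs) (w : String × String × String) :
    pvRunsStep gs w = gs ++ [(pvKey w, [w])] := by
  cases hgsl : gs.getLast? with
  | none =>
    have : gs = [] := List.getLast?_eq_none_iff.1 hgsl
    subst this
    simp [pvRunsStep]
  | some g =>
    have hg : g.1 = none := by simpa [pvClosedGs, hgsl] using hgs
    obtain ⟨gs', rfl⟩ : ∃ gs', gs = gs' ++ [g] := by
      rcases List.eq_nil_or_concat gs with h | ⟨gs', g', h⟩
      · subst h; simp at hgsl
      · subst h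
        have hg' : g' = g := by simpa using hgsl
        exact ⟨gs', by rw [hg', List.concat_eq_append]⟩
    have hc : ¬ (pvKey w ≠ none ∧ gs' ++ [g] ≠ [] ∧
        (PySem.List.pyGetD (gs' ++ [g]) (-1) (none, [])).1 = pvKey w) := by
      rw [PySem.List.pyGetD_neg_one_append_singleton]
      rintro ⟨h1, _, h3⟩
      exact h1 (by rw [← h3]; exact hg)
    simp only [pvRunsStep]
    rw [if_neg hc]

-- joint invariant for B's grouping fold
theorem pv_joint (s : List (String × String × String)) :
    (∀ (gs : List (Option String × List (String × String × String)))
        (σ : String) (r : List (String × String × String)), r ≠ [] → pvCoh σ r →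
      (List.foldl pvRunsStep (gs ++ [(some σ, r)]) s).flatMap pvEmitG
        = gs.flatMap pvEmitG ++ pvFwd (r ++ s) "")
    ∧ (∀ (gs : List (Option String × List (String × String × String))), pvClosedGs gs →
      (List.foldl pvRunsStep gs s).flatMap pvEmitG
        = gs.flatMap pvEmitG ++ pvFwd s "") := by
  induction s with
  | nil =>
    constructor
    · intro gs σ r hr hcoh
      simp only [List.foldl_nil, List.flatMap_append, List.flatMap_cons, List.flatMap_nil,
        List.append_nil]
      rw [pv_emitG_some σ r hr, pv_fwd_run σ r hcoh hr]
    · intro gs _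
      simp [pvFwd]
  | cons w rest ih =>
    constructor
    · intro gs σ r hr hcoh
      simp only [List.foldl_cons]
      rw [pv_runsstep_open]
      by_cases hk : pvKey w = some σ
      · rw [if_pos hk]
        obtain ⟨hw1, hw2⟩ := pv_key_some hk
        have := ih.1 gs σ (r ++ [w]) (by simp) (by
          intro x hx
          rcases List.mem_append.1 hx with hx | hx
          · exact hcoh x hx
          · simp at hx; subst hx; exact ⟨hw1, hw2⟩)
        rw [this, List.append_assoc]
        rfl
      · rw [if_neg hk]
        cases hkey : pvKey w with
        | some τ =>
          obtain ⟨hw1, hw2⟩ := pv_key_some hkey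
          have := ih.1 (gs ++ [(some σ, r)]) τ [w] (by simp)
            (by intro x hx; simp at hx; subst hx; exact ⟨hw1, hw2⟩)
          rw [this]
          rw [pv_fwd_append_closed r σ (w :: rest) hcoh hr
            (by simp only [pvHeadClose]; simpa [hkey] using hk)]
          simp [pv_emitG_some σ r hr]
        | none =>
          have hclosed : pvClosedGs ((gs ++ [(some σ, r)]) ++ [(none, [w])]) := by
            simp [pvClosedGs]
          have := ih.2 ((gs ++ [(some σ, r)]) ++ [(none, [w])]) hclosed
          rw [this]
          rw [pv_fwd_append_closed r σ (w :: rest) hcoh hr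
            (by simp [pvHeadClose, hkey])]
          rw [pv_fwd_pass w rest (pv_key_none hkey)]
          simp [pv_emitG_some σ r hr, pv_emitG_none]
    · intro gs hgs
      simp only [List.foldl_cons]
      rw [pv_runsstep_closed gs hgs w]
      cases hkey : pvKey w with
      | some τ =>
        obtain ⟨hw1, hw2⟩ := pv_key_some hkey
        have := ih.1 gs τ [w] (by simp)
          (by intro x hx; simp at hx; subst hx; exact ⟨hw1, hw2⟩)
        simpa using this
      | none =>
        have hclosed : pvClosedGs (gs ++ [(none, [w])]) := by simp [pvClosedGs]
        have := ih.2 (gs ++ [(none, [w])]) hclosed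
        rw [this]
        rw [pv_fwd_pass w rest (pv_key_none hkey)]
        simp [pv_emitG_none]

-- B's per-sentence body equals the forward-lookahead reference
theorem pv_rowB_eq (s : List (String × String × String)) :
    (s.foldl pvRunsStep []).foldl pvEmitStep [] = pvFwd s "" := by
  rw [pv_foldl_emit]
  have := (pv_joint s).2 [] (by simp [pvClosedGs])
  simpa using this

-- per-sentence bodies, named so the outer folds can be rewritten (proof helpers only)
def pvRowA (s : List (String × String × String)) : List (String × String × String) :=
  let n : Int := (s.length : Int)
  let st := ((PySem.List.pyRange 0 n 1).reverse).foldl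
    (fun st i => pvAStep st (PySem.List.pyGetD s i ("", "", ""))) ([], none, true)
  let correct_s := st.1
  ((PySem.List.pyRange 0 n 1).reverse).foldl
    (fun acc i => acc ++ [PySem.List.pyGetD correct_s i ("", "", "")]) []

def pvRowB (s : List (String × String × String)) : List (String × String × String) :=
  (s.foldl pvRunsStep []).foldl pvEmitStep []

theorem pv_unfoldA (data : List (List (String × String × String))) :
    process_data_mode_name_l data = data.foldl (fun cd s => cd ++ [pvRowA s]) [] := rfl

theorem pv_unfoldB (data : List (List (String × String × String))) :
    process_data_mode_name_l_alt data = data.foldl (fun cd s => cd ++ [pvRowB s]) [] := rfl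

-- ===== VERDICT (by name: the statement is the Claim_ definition above) =====
theorem process_data_mode_name_l_spec : Claim_equal_process_data_mode_name_l := by
  intro data _
  unfold Spec_process_data_mode_name_l
  rw [pv_unfoldA, pv_unfoldB,
    PySem.List.foldl_append_singleton_eq_map pvRowA data [],
    PySem.List.foldl_append_singleton_eq_map pvRowB data []]
  simp only [List.nil_append]
  apply List.map_congr_left
  intro s _
  rw [show pvRowA s = pvFwd s "" from pv_rowA_eq s,
    show pvRowB s = pvFwd s "" from pv_rowB_eq s]
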